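-- pv_equiv track=rewrite | github.com/billxllid/mydicts | tools/ext_dict_maker/backup_file.py | num_to_dict
-- ===== SOURCE A (Python) =====
-- def num_to_dict(bit=1):
--     """
--     '0', '1', '2', '00', '01', '02', '66', '88'
--     """
--     dict = []
--     num_map = range(0, 10)
--     for i in range(0, bit):
--         if i == 0:
--             zero = ''
--         if i == 1:
--             zero = '0'
--         dict.extend(['{0}{1}'.format(zero, i) for i in num_map])
--         zero = zero + '0'
--     return dict
-- ===== SOURCE B (Python) =====
-- def num_to_dict(bit=1):
--     # One flat enumeration: entry k (0 <= k < 10*bit) is digit k%10 zero-padded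
--     # to width k//10 + 1.  No nested loops, no carried prefix accumulator.
--     return [str(k % 10).zfill(k // 10 + 1) for k in range(10 * bit)]
-- ===== Notes on version B (the rewrite author's own statement) =====
-- stated objective: alternative
-- what changed: A's nested loop with a loop-carried zero-prefix accumulator is replaced by a single flat enumeration of one counter k in range(10*bit), decoding width and digit as (k//10+1, k%10) and padding with str.zfill.
import Mathlib
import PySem

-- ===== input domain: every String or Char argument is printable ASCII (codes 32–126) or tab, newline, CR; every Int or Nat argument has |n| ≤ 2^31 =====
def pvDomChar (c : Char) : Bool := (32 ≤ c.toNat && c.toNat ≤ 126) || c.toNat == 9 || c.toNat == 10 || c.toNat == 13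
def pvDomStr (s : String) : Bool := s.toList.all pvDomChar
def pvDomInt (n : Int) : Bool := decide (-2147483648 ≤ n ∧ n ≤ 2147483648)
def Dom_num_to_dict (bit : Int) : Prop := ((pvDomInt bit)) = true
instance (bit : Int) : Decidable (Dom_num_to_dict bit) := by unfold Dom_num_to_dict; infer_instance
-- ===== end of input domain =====

-- B replaces A's nested loop with carried `zero` accumulator by one flat enumeration of
-- a single counter k in range(10*bit), decoding width and digit with divmod and str.zfill.


-- ===== PORT A =====
-- literal port: foldl carries (dict, zero); `zero` starts as "" (Python leaves it
-- unbound, but the first iteration i = 0 always assigns it before any read)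
def num_to_dict (bit : Int) : List String :=
  (((PySem.List.pyRange 0 bit 1).foldl
      (fun (st : List String × String) i =>
        let zero := if i = 0 then "" else st.2
        let zero := if i = 1 then "0" else zero
        let dict := st.1 ++ (PySem.List.pyRange 0 10 1).map
          (fun d => zero ++ PySem.Int.toStr d)
        (dict, zero ++ "0"))
      ([], ""))).1

-- ===== PORT B =====
-- one flat map over k ∈ range(10*bit): digit k % 10, zero-padded to width k // 10 + 1
def num_to_dict_alt (bit : Int) : List String :=
  (PySem.List.pyRange 0 (10 * bit) 1).map (fun k =>
    PySem.Str.zfill (PySem.Int.toStr (PySem.Int.mod k 10)) (PySem.Int.floordiv k 10 + 1))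

-- ===== PRECONDITION & SPEC =====
def Spec_num_to_dict (bit : Int) (out : List String) : Prop := out = num_to_dict_alt bit
instance (bit : Int) (out : List String) : Decidable (Spec_num_to_dict bit out) := by unfold Spec_num_to_dict; infer_instance

-- ===== CLAIM (what is proved, stated in full; the proofs are below) =====
def Claim_equal_num_to_dict : Prop := ∀ (bit : Int), Dom_num_to_dict bit → Spec_num_to_dict bit (num_to_dict bit)

-- ===== LEMMAS AND PROOFS =====

-- zfill of a single non-sign character pads with exactly n zeros at width n+1
theorem zfill_single (c : Char) (n : Nat) (hc : ¬(c = '+' ∨ c = '-')) (s : String)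
    (hs : s.toList = [c]) :
    PySem.Str.zfill s ((n : Int) + 1) = String.ofList (List.replicate n '0') ++ s := by
  apply String.toList_inj.mp
  rw [PySem.Str.toList_zfill, hs]
  match n with
  | 0 => simp [PySem.Chars.zfill, hs]
  | (m+1) =>
    simp only [PySem.Chars.zfill, hc, if_false]
    have hw : ¬((((m + 1 : Nat)) : Int) + 1 ≤ (([c] : List Char).length : Int)) := by
      simp
    rw [if_neg hw]
    have h2 : (((m + 1 : Nat) : Int) + 1).toNat - ([c] : List Char).length = m + 1 := by
      simp
      omega
    rw [h2]
    simp [hs]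

-- B at one more width: the ten new counter values decode to prefix '0'*n ++ digit
theorem alt_succ (n : Nat) :
    num_to_dict_alt ((n : Int) + 1)
      = num_to_dict_alt (n : Int) ++ (PySem.List.pyRange 0 10 1).map
          (fun d => String.ofList (List.replicate n '0') ++ PySem.Int.toStr d) := by
  unfold num_to_dict_alt
  have hsplit : PySem.List.pyRange 0 (10 * ((n : Int) + 1)) 1
      = PySem.List.pyRange 0 (10 * (n : Int)) 1
        ++ PySem.List.pyRange (10 * (n : Int)) (10 * ((n : Int) + 1)) 1 :=
    PySem.List.pyRange_one_append 0 (10 * (n : Int)) (10 * ((n : Int) + 1))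
      (by positivity) (by omega)
  rw [hsplit, List.map_append]
  congr 1
  have hblk : PySem.List.pyRange (10 * (n : Int)) (10 * ((n : Int) + 1)) 1
      = [10*(n:Int), 10*(n:Int)+1, 10*(n:Int)+2, 10*(n:Int)+3, 10*(n:Int)+4,
         10*(n:Int)+5, 10*(n:Int)+6, 10*(n:Int)+7, 10*(n:Int)+8, 10*(n:Int)+9] := by
    rw [PySem.List.pyRange_one]
    have : (10 * ((n : Int) + 1) - 10 * (n : Int)).toNat = 10 := by omega
    rw [this]
    simp [List.range_succ]
  have h10 : PySem.List.pyRange 0 10 1 = [0,1,2,3,4,5,6,7,8,9] := by decide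
  rw [hblk, h10]
  simp only [List.map]
  have hmod : ∀ j : Int, 0 ≤ j → j < 10 → PySem.Int.mod (10*(n:Int)+j) 10 = j := by
    intro j h0 h1
    rw [PySem.Int.mod_eq_emod_of_pos (by norm_num)]
    omega
  have hdiv : ∀ j : Int, 0 ≤ j → j < 10 → PySem.Int.floordiv (10*(n:Int)+j) 10 = (n:Int) := by
    intro j h0 h1
    rw [PySem.Int.floordiv_eq_ediv_of_pos (by norm_num)]
    omega
  have m0 : PySem.Int.mod (10*(n:Int)) 10 = 0 := by
    rw [PySem.Int.mod_eq_emod_of_pos (by norm_num)]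
    omega
  have d0 : PySem.Int.floordiv (10*(n:Int)) 10 = (n:Int) := by
    rw [PySem.Int.floordiv_eq_ediv_of_pos (by norm_num)]
    omega
  simp only [m0, d0,
    hmod 1 (by norm_num) (by norm_num), hdiv 1 (by norm_num) (by norm_num),
    hmod 2 (by norm_num) (by norm_num), hdiv 2 (by norm_num) (by norm_num),
    hmod 3 (by norm_num) (by norm_num), hdiv 3 (by norm_num) (by norm_num),
    hmod 4 (by norm_num) (by norm_num), hdiv 4 (by norm_num) (by norm_num),
    hmod 5 (by norm_num) (by norm_num), hdiv 5 (by norm_num) (by norm_num),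
    hmod 6 (by norm_num) (by norm_num), hdiv 6 (by norm_num) (by norm_num),
    hmod 7 (by norm_num) (by norm_num), hdiv 7 (by norm_num) (by norm_num),
    hmod 8 (by norm_num) (by norm_num), hdiv 8 (by norm_num) (by norm_num),
    hmod 9 (by norm_num) (by norm_num), hdiv 9 (by norm_num) (by norm_num)]
  rw [zfill_single '0' n (by decide) (PySem.Int.toStr 0) (by decide),
      zfill_single '1' n (by decide) (PySem.Int.toStr 1) (by decide),
      zfill_single '2' n (by decide) (PySem.Int.toStr 2) (by decide),
      zfill_single '3' n (by decide) (PySem.Int.toStr 3) (by decide),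
      zfill_single '4' n (by decide) (PySem.Int.toStr 4) (by decide),
      zfill_single '5' n (by decide) (PySem.Int.toStr 5) (by decide),
      zfill_single '6' n (by decide) (PySem.Int.toStr 6) (by decide),
      zfill_single '7' n (by decide) (PySem.Int.toStr 7) (by decide),
      zfill_single '8' n (by decide) (PySem.Int.toStr 8) (by decide),
      zfill_single '9' n (by decide) (PySem.Int.toStr 9) (by decide)]

-- invariant: after processing widths 0..n-1 the carried `zero` is '0'*n and dict is B's list
theorem num_to_dict_inv (n : Nat) :
    ((PySem.List.pyRange 0 (n : Int) 1).foldl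
      (fun (st : List String × String) i =>
        let zero := if i = 0 then "" else st.2
        let zero := if i = 1 then "0" else zero
        let dict := st.1 ++ (PySem.List.pyRange 0 10 1).map
          (fun d => zero ++ PySem.Int.toStr d)
        (dict, zero ++ "0"))
      ([], ""))
    = (num_to_dict_alt (n : Int), String.ofList (List.replicate n '0')) := by
  induction n with
  | zero =>
    simp [num_to_dict_alt, PySem.List.pyRange_one_eq_nil]
  | succ n ih =>
    have hsplit : PySem.List.pyRange 0 ((n : Int) + 1) 1
        = PySem.List.pyRange 0 (n : Int) 1 ++ [(n : Int)] := by
      exact PySem.List.pyRange_one_succ_right (by exact_mod_cast Nat.zero_le n)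
    push_cast
    rw [hsplit, List.foldl_append, ih]
    simp only [List.foldl_cons, List.foldl_nil]
    have hzero : (if (n : Int) = 1 then "0" else if (n : Int) = 0 then "" else String.ofList (List.replicate n '0'))
        = String.ofList (List.replicate n '0') := by
      match n with
      | 0 => decide
      | 1 => decide
      | (k+2) =>
        split_ifs with a b
        · exfalso; omega
        · exfalso; omega
        · rfl
    simp only [hzero]
    have hsnd : String.ofList (List.replicate (n + 1) '0')
        = String.ofList (List.replicate n '0') ++ "0" := by
      rw [List.replicate_succ']
      simp
    rw [alt_succ, hsnd]

-- ===== VERDICT (by name: the statement is the Claim_ definition above) =====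
theorem num_to_dict_spec : Claim_equal_num_to_dict := by
  intro bit _
  unfold Spec_num_to_dict num_to_dict
  by_cases h : bit ≤ 0
  · rw [PySem.List.pyRange_one_eq_nil h]
    unfold num_to_dict_alt
    rw [PySem.List.pyRange_one_eq_nil (show 10 * bit ≤ 0 by omega)]
    rfl
  · have hb : bit = ((bit.toNat : Nat) : Int) := by omega
    rw [hb, num_to_dict_inv]
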